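-- pv_equiv track=rewrite | github.com/saisravan84/cipherproject | pro4/project/algos/ceagnere/act_pages/algos/vcen.py | encr
-- ===== SOURCE A (Python) =====
-- def encr(plaintext,key_1,key_2):
-- 	import math
-- 	alpha="abcdefghijklmnopqrstuvwxyz"
-- 	input_string=plaintext
-- 	input_key=int(key_1)
-- 	input_string_list=[i for i in input_string]
-- 	output_string_list=[]
-- 	for i in input_string_list:
-- 		lower_i=i.lower()
-- 		if i in alpha:
-- 			indexpo=alpha.index(i)
-- 			output_string_list.append(alpha[(indexpo+input_key)%26])
-- 		elif lower_i in alpha: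
-- 			indexpo=alpha.index(lower_i)
-- 			output_string_list.append(alpha[(indexpo+input_key)%26].upper())
-- 		else:
-- 			output_string_list.append(i)
-- 	output_string=''.join(output_string_list)
-- 	input_string=output_string
-- 	input_key=key_2
-- 	input_string_list=[i.lower() for i in input_string if i in alpha]
-- 	input_key_list=[i.lower() for i in input_key if i in alpha]
-- 	input_string_len=len(input_string_list)
-- 	input_key_len=len(input_key_list)
-- 	division=math.ceil(input_string_len/input_key_len)
-- 	string_blocks=[[] for i in range(division)]
-- 	cipher_blocks=[[] for i in range(division)]
-- 	delimiter=0
-- 	i=0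
-- 	for i in range(len(string_blocks)):
-- 		for j in range(input_key_len):
-- 			if delimiter<input_string_len:
-- 				string_blocks[i].append(input_string_list[delimiter])
-- 				delimiter+=1
--
-- 	for i in string_blocks:
-- 		for j in range(len(i)):
-- 			string_index=alpha.index(i[j])
-- 			key_index=alpha.index(input_key[j])
-- 			cipher_text=alpha[(string_index+key_index)%26]
-- 			cipher_blocks[string_blocks.index(i)].append(cipher_text)
--
-- 	output_string_list=[]
-- 	for i in cipher_blocks:
-- 		output_string_list.extend(i)
--
-- 	output_string=''.join(output_string_list)
-- 	return output_string
-- ===== SOURCE B (Python) =====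
-- def encr(plaintext, key_1, key_2):
--     alpha = "abcdefghijklmnopqrstuvwxyz"
--     shift = int(key_1)
--     # Caesar-shift the lowercase letters; only they take part in the Vigenere stage.
--     letters = [alpha[(alpha.index(c) + shift) % 26] for c in plaintext if c in alpha]
--     key = [alpha.index(c) for c in key_2 if c in alpha]
--     m = len(key)
--     return ''.join(alpha[(alpha.index(c) + key[i % m]) % 26]
--                    for i, c in enumerate(letters))
-- ===== Notes on version B (the rewrite author's own statement) =====
-- stated objective: faster
-- what changed: B fuses the Caesar stage with the Vigenere stage's lowercase-letter filter and enciphers in one indexed pass with the key letter at position i mod m, instead of materialising blocks and routing each block's ciphertext through repeated string_blocks.index list scans.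
-- intended difference: On inputs whose letter sequence contains two equal m-letter blocks separated by a different block, A's string_blocks.index(i) routes the later duplicate's ciphertext into the first equal block's slot, reordering the ciphertext (e.g. 'bbc' for plaintext 'aba', shift 0, key 'b'); B returns the position-wise Vigenere ciphertext ('bcb'), which is the intended encryption. — e.g. on encr("aba", 0, "b"): A returns "bbc", B returns "bcb"
import Mathlib
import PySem

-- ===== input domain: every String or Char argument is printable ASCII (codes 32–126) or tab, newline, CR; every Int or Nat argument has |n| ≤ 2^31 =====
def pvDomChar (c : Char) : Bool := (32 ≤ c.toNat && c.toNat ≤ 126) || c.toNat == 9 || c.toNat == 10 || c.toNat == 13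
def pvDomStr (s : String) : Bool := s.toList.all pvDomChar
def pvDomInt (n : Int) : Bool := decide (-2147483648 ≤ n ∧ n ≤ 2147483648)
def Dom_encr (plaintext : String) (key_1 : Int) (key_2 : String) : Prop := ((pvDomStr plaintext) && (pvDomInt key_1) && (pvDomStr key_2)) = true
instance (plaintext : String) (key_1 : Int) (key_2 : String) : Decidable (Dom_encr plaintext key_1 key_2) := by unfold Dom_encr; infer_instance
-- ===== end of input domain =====

-- B enciphers the filtered letters in one indexed pass (key letter i mod m) instead of
-- materialising blocks and routing each block through repeated list.index scans; on inputs
-- with duplicate separated blocks (D_encr) B returns the position-wise ciphertext instead.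

def pvAlpha : List Char := "abcdefghijklmnopqrstuvwxyz".toList

-- ===== PORT A =====
-- literal transliteration of A; the ''.join / re-iterate round trip is kept as the char list
def encr (plaintext : String) (key_1 : Int) (key_2 : String) : String :=
  let input_key := key_1
  -- Caesar stage
  let caesar : List Char := plaintext.toList.foldl (fun out i =>
    let lower_i := PySem.Chars.lowerChar i
    if pvAlpha.contains i then
      let indexpo : Nat := (PySem.List.index? pvAlpha i).getD 0   -- alpha.index(i), guarded by `i in alpha`
      out ++ [PySem.List.pyGetD pvAlpha (PySem.Int.mod ((indexpo : Int) + input_key) 26) ' ']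
    else if pvAlpha.contains lower_i then
      let indexpo : Nat := (PySem.List.index? pvAlpha lower_i).getD 0
      out ++ [PySem.Chars.upperChar (PySem.List.pyGetD pvAlpha (PySem.Int.mod ((indexpo : Int) + input_key) 26) ' ')]
    else out ++ [i]) []
  -- Vigenere stage
  let input_string_list : List Char := (caesar.filter (fun i => pvAlpha.contains i)).map PySem.Chars.lowerChar
  let input_key_list : List Char := (key_2.toList.filter (fun i => pvAlpha.contains i)).map PySem.Chars.lowerChar
  let n := input_string_list.length
  let m := input_key_list.length
  let division : Nat := (n + m - 1) / m   -- math.ceil(n/m); exact for m > 0 (m = 0 raises in Python: excluded by Pre_encr)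
  let filled := (List.range division).foldl (fun (st : List (List Char) × Nat) i =>
      (List.range m).foldl (fun st _j =>
        if st.2 < n then (st.1.set i (st.1.getD i [] ++ [input_string_list.getD st.2 ' ']), st.2 + 1)
        else st) st) (List.replicate division ([] : List Char), 0)
  let string_blocks := filled.1
  let cipher_blocks := string_blocks.foldl (fun cb blk =>
      (List.range blk.length).foldl (fun cb j =>
        let string_index : Nat := (PySem.List.index? pvAlpha (blk.getD j ' ')).getD 0
        -- alpha.index(input_key[j]); raises unless key_2[j] is a lowercase letter: Pre_encr
        let key_index : Nat := (PySem.List.index? pvAlpha (key_2.toList.getD j ' ')).getD 0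
        let cipher_text := PySem.List.pyGetD pvAlpha (PySem.Int.mod ((string_index : Int) + (key_index : Int)) 26) ' '
        let idx : Nat := (PySem.List.index? string_blocks blk).getD 0   -- string_blocks.index(i), always found
        cb.set idx (cb.getD idx [] ++ [cipher_text])) cb) (List.replicate division ([] : List Char))
  String.ofList (cipher_blocks.foldl (fun acc i => acc ++ i) [])

-- ===== PORT B =====
-- literal transliteration of Source B: one comprehension per stage, one indexed pass to encipher
def encr_alt (plaintext : String) (key_1 : Int) (key_2 : String) : String :=
  let shift := key_1
  let letters : List Char := (plaintext.toList.filter (fun c => pvAlpha.contains c)).map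
      (fun c => PySem.List.pyGetD pvAlpha (PySem.Int.mod (((PySem.List.index? pvAlpha c).getD 0 : Int) + shift) 26) ' ')
  let key : List Int := (key_2.toList.filter (fun c => pvAlpha.contains c)).map
      (fun c => (((PySem.List.index? pvAlpha c).getD 0 : Nat) : Int))
  let m : Nat := key.length
  String.ofList ((PySem.List.enumerate letters).map (fun p =>
    PySem.List.pyGetD pvAlpha
      (PySem.Int.mod (((PySem.List.index? pvAlpha p.2).getD 0 : Int) +
        PySem.List.pyGetD key (PySem.Int.mod p.1 (m : Int)) 0) 26) ' '))

-- ===== PRECONDITION & SPEC =====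
-- Pre_encr is exactly where the Python A returns normally: A raises ZeroDivisionError when key_2
-- has no lowercase letter, and ValueError (alpha.index) when some key_2[j] with j below the
-- longest block length min(n, m) is not a lowercase letter.
def Pre_encr (plaintext : String) (key_1 : Int) (key_2 : String) : Prop :=
  let n := plaintext.toList.countP (fun c => pvAlpha.contains c)
  let m := key_2.toList.countP (fun c => pvAlpha.contains c)
  0 < m ∧ ((List.range (min n m)).all (fun j => pvAlpha.contains (key_2.toList.getD j ' '))) = true
instance (plaintext : String) (key_1 : Int) (key_2 : String) : Decidable (Pre_encr plaintext key_1 key_2) := by unfold Pre_encr; infer_instance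

def pvWitness_encr : String × Int × String := ("Attack at dawn!", 3, "key")

-- On inputs whose lowercase-letter sequence contains two equal m-letter blocks (blocks i and k)
-- separated by a different block j, A's string_blocks.index(i) routes the later duplicate's
-- ciphertext into the first equal block's slot, reordering the ciphertext; B returns the
-- position-wise Vigenere ciphertext, which is the intended encryption.
def D_encr (plaintext : String) (key_1 : Int) (key_2 : String) : Prop :=
  let L := plaintext.toList.filter (pvAlpha.contains ·)
  let m := key_2.toList.countP (pvAlpha.contains ·)
  ∃ k < (L.length + m - 1) / m, ∃ j < k, ∃ i < j,
    (L.drop (i * m)).take m = (L.drop (k * m)).take m ∧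
    (L.drop (i * m)).take m ≠ (L.drop (j * m)).take m
instance (plaintext : String) (key_1 : Int) (key_2 : String) : Decidable (D_encr plaintext key_1 key_2) := by unfold D_encr; infer_instance

def Spec_encr (plaintext : String) (key_1 : Int) (key_2 : String) (out : String) : Prop := ¬ D_encr plaintext key_1 key_2 → out = encr_alt plaintext key_1 key_2
instance (plaintext : String) (key_1 : Int) (key_2 : String) (out : String) : Decidable (Spec_encr plaintext key_1 key_2 out) := by unfold Spec_encr; infer_instance

def pvDiffWitness_encr : String × Int × String := ("aba", 0, "b")
def pvDiffWitnessOut_encr : String × String := ("bbc", "bcb")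

-- ===== CLAIM (what is proved, stated in full; the proofs are below) =====
def Claim_unchanged_encr : Prop := ∀ (plaintext : String) (key_1 : Int) (key_2 : String), Dom_encr plaintext key_1 key_2 → Pre_encr plaintext key_1 key_2 → Spec_encr plaintext key_1 key_2 (encr plaintext key_1 key_2)
def Claim_exact_encr : Prop := ∀ (plaintext : String) (key_1 : Int) (key_2 : String), Dom_encr plaintext key_1 key_2 → Pre_encr plaintext key_1 key_2 → D_encr plaintext key_1 key_2 → encr plaintext key_1 key_2 ≠ encr_alt plaintext key_1 key_2
def Claim_changed_encr : Prop := Dom_encr (pvDiffWitness_encr.1) (pvDiffWitness_encr.2.1) (pvDiffWitness_encr.2.2) ∧ Pre_encr (pvDiffWitness_encr.1) (pvDiffWitness_encr.2.1) (pvDiffWitness_encr.2.2) ∧ D_encr (pvDiffWitness_encr.1) (pvDiffWitness_encr.2.1) (pvDiffWitness_encr.2.2) ∧ encr (pvDiffWitness_encr.1) (pvDiffWitness_encr.2.1) (pvDiffWitness_encr.2.2) = pvDiffWitnessOut_encr.1 ∧ encr_alt (pvDiffWitness_encr.1) (pvDiffWitness_encr.2.1) (pvDiffWitness_encr.2.2)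 = pvDiffWitnessOut_encr.2 ∧ pvDiffWitnessOut_encr.1 ≠ pvDiffWitnessOut_encr.2

-- ===== LEMMAS AND PROOFS =====

-- proof-side names for the character operations both ports write inline
def pvIdx (c : Char) : Int := ((PySem.List.index? pvAlpha c).getD 0 : Int)
def pvAt (v : Int) : Char := PySem.List.pyGetD pvAlpha v ' '
def pvShift (k : Int) (c : Char) : Char := pvAt (PySem.Int.mod (pvIdx c + k) 26)
def pvCaesar (k : Int) (c : Char) : Char :=
  if pvAlpha.contains c then pvShift k c
  else if pvAlpha.contains (PySem.Chars.lowerChar c) then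
    PySem.Chars.upperChar (pvShift k (PySem.Chars.lowerChar c))
  else c
def pvCipher (key : List Char) (b : List Char) : List Char :=
  (b.zip key).map (fun p => pvShift (pvIdx p.2) p.1)

-- 26 concrete facts about the alphabet
set_option maxRecDepth 4096 in
theorem pv_alpha_facts_bool : pvAlpha.all (fun c =>
    decide (PySem.Chars.lowerChar c = c) && !(pvAlpha.contains (PySem.Chars.upperChar c))) = true := by
  decide

theorem pv_alpha_facts : ∀ c ∈ pvAlpha,
    PySem.Chars.lowerChar c = c ∧ PySem.Chars.upperChar c ∉ pvAlpha := by
  intro c hc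
  have h := pv_alpha_facts_bool
  rw [List.all_eq_true] at h
  have hcc := h c hc
  simp only [Bool.and_eq_true, decide_eq_true_eq, Bool.not_eq_true'] at hcc
  exact ⟨hcc.1, by simpa using hcc.2⟩

theorem pv_alpha_len : pvAlpha.length = 26 := by decide

theorem pv_alpha_nodup : pvAlpha.Nodup := by decide

theorem pv_shift_mem (k : Int) (c : Char) : pvShift k c ∈ pvAlpha := by
  have h1 := PySem.Int.mod_nonneg (pvIdx c + k) (show (0:Int) < 26 by norm_num)
  have h2 := PySem.Int.mod_lt (pvIdx c + k) (show (0:Int) < 26 by norm_num)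
  have hlen : pvAlpha.length = 26 := pv_alpha_len
  simp only [pvShift, pvAt]
  exact PySem.List.pyGetD_mem _ _ (by constructor <;> [rw [hlen]; rw [hlen]] <;> push_cast <;> omega)

-- A's Caesar loop is a map
theorem pv_caesar_eq (pt : List Char) (k : Int) :
    pt.foldl (fun out i =>
      let lower_i := PySem.Chars.lowerChar i
      if pvAlpha.contains i then
        let indexpo : Nat := (PySem.List.index? pvAlpha i).getD 0
        out ++ [PySem.List.pyGetD pvAlpha (PySem.Int.mod ((indexpo : Int) + k) 26) ' ']
      else if pvAlpha.contains lower_i then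
        let indexpo : Nat := (PySem.List.index? pvAlpha lower_i).getD 0
        out ++ [PySem.Chars.upperChar (PySem.List.pyGetD pvAlpha (PySem.Int.mod ((indexpo : Int) + k) 26) ' ')]
      else out ++ [i]) [] = pt.map (pvCaesar k) := by
  have heq := PySem.List.foldl_congr_mem
    (l := pt) (init := ([] : List Char))
    (f := fun out i =>
      let lower_i := PySem.Chars.lowerChar i
      if pvAlpha.contains i then
        let indexpo : Nat := (PySem.List.index? pvAlpha i).getD 0
        out ++ [PySem.List.pyGetD pvAlpha (PySem.Int.mod ((indexpo : Int) + k) 26) ' ']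
      else if pvAlpha.contains lower_i then
        let indexpo : Nat := (PySem.List.index? pvAlpha lower_i).getD 0
        out ++ [PySem.Chars.upperChar (PySem.List.pyGetD pvAlpha (PySem.Int.mod ((indexpo : Int) + k) 26) ' ')]
      else out ++ [i])
    (g := fun out c => out ++ [pvCaesar k c])
    (by
      intro acc x _
      simp only [pvCaesar, pvShift, pvIdx, pvAt]
      split_ifs <;> rfl)
  rw [heq, PySem.List.foldl_append_singleton_eq_map, List.nil_append]

-- the letters surviving A's Vigenere-stage filter are the shifted lowercase letters of the input
theorem pv_letters_eq (pt : List Char) (k : Int) :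
    ((pt.map (pvCaesar k)).filter (fun c => pvAlpha.contains c)).map PySem.Chars.lowerChar
      = (pt.filter (fun c => pvAlpha.contains c)).map (pvShift k) := by
  induction pt with
  | nil => rfl
  | cons c pt ih =>
    simp only [List.map_cons, List.filter_cons]
    by_cases hc : c ∈ pvAlpha
    · have h1 : pvCaesar k c = pvShift k c := by simp [pvCaesar, hc]
      have h2 := pv_shift_mem k c
      have h3 := (pv_alpha_facts _ h2).1
      simp [h1, hc, h2, h3]
      simpa using ih
    · have h1 : pvCaesar k c =
          if pvAlpha.contains (PySem.Chars.lowerChar c) then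
            PySem.Chars.upperChar (pvShift k (PySem.Chars.lowerChar c)) else c := by
        simp [pvCaesar, hc]
      by_cases hl : PySem.Chars.lowerChar c ∈ pvAlpha
      · have h4 := (pv_alpha_facts _ (pv_shift_mem k (PySem.Chars.lowerChar c))).2
        simp [h1, hl, h4, hc]
        simpa using ih
      · simp [h1, hl, hc]
        simpa using ih

-- splitting a list into blocks of m (proof-side only; fuelled so that it reduces)
def pvChunkF : Nat → Nat → List Char → List (List Char)
  | 0, _, _ => []
  | fuel + 1, m, l => if l = [] ∨ m = 0 then [] else l.take m :: pvChunkF fuel m (l.drop m)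
def pvChunk (m : Nat) (l : List Char) : List (List Char) := pvChunkF l.length m l

-- unfolding equation for pvChunk (its fuel is invisible)
theorem pv_chunkF_congr (m : Nat) :
    ∀ (fuel fuel' : Nat) (l : List Char), l.length ≤ fuel → l.length ≤ fuel' →
      pvChunkF fuel m l = pvChunkF fuel' m l := by
  intro fuel
  induction fuel with
  | zero =>
    intro fuel' l hl _
    have : l = [] := List.eq_nil_of_length_eq_zero (Nat.le_zero.mp hl)
    subst this
    cases fuel' <;> simp [pvChunkF]
  | succ fuel ih =>
    intro fuel' l hl hl'
    cases fuel' with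
    | zero =>
      have : l = [] := List.eq_nil_of_length_eq_zero (Nat.le_zero.mp hl')
      subst this
      simp [pvChunkF]
    | succ fuel' =>
      simp only [pvChunkF]
      by_cases hc : l = [] ∨ m = 0
      · rw [if_pos hc, if_pos hc]
      · rw [if_neg hc, if_neg hc]
        have hm : 0 < m := by omega
        have hlen : 0 < l.length := List.length_pos_iff.mpr (by tauto)
        refine congrArg₂ List.cons rfl ?_
        exact ih fuel' (l.drop m) (by simp only [List.length_drop]; omega)
          (by simp only [List.length_drop]; omega)

theorem pv_chunk_eq (m : Nat) (l : List Char) :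
    pvChunk m l = if l = [] ∨ m = 0 then [] else l.take m :: pvChunk m (l.drop m) := by
  by_cases hc : l = [] ∨ m = 0
  · rw [if_pos hc]
    rcases hc with h | h
    · subst h; rfl
    · subst h
      cases hl : l.length with
      | zero => rw [pvChunk, hl]; rfl
      | succ n => rw [pvChunk, hl]; simp [pvChunkF]
  · rw [if_neg hc]
    have hm : 0 < m := by omega
    have hlen : 0 < l.length := List.length_pos_iff.mpr (by tauto)
    obtain ⟨n, hn⟩ : ∃ n, l.length = n + 1 := ⟨l.length - 1, by omega⟩
    rw [pvChunk, hn]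
    simp only [pvChunkF]
    rw [if_neg hc]
    refine congrArg₂ List.cons rfl ?_
    rw [pvChunk]
    exact pv_chunkF_congr m n (l.drop m).length (l.drop m)
      (by simp only [List.length_drop]; omega) le_rfl

-- pvChunk in closed form
theorem pv_chunk_map (m : Nat) (hm : 0 < m) (l : List Char) :
    pvChunk m l = (List.range ((l.length + m - 1) / m)).map (fun i => (l.drop (i * m)).take m) := by
  have aux : ∀ (fuel : Nat) (l : List Char), l.length ≤ fuel →
      pvChunk m l = (List.range ((l.length + m - 1) / m)).map (fun i => (l.drop (i * m)).take m) := by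
    intro fuel
    induction fuel with
    | zero =>
      intro l hl
      have : l = [] := List.eq_nil_of_length_eq_zero (Nat.le_zero.mp hl)
      subst this
      rw [pv_chunk_eq]
      simp [Nat.div_eq_of_lt (show m - 1 < m by omega)]
    | succ fuel ih =>
      intro l hl
      by_cases hnil : l = []
      · subst hnil
        rw [pv_chunk_eq]
        simp [Nat.div_eq_of_lt (show m - 1 < m by omega)]
      · rw [pv_chunk_eq, if_neg (by simp [hnil]; omega)]
        have hlen : 0 < l.length := List.length_pos_iff.mpr hnil
        rw [ih (l.drop m) (by simp [List.length_drop]; omega)]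
        have hq : (l.length + m - 1) / m = ((l.drop m).length + m - 1) / m + 1 := by
          simp only [List.length_drop]
          by_cases hle : l.length ≤ m
          · have h1 : (l.length + m - 1) / m = 1 := Nat.div_eq_of_lt_le (by omega) (by omega)
            have h2 : (l.length - m + m - 1) / m = 0 := Nat.div_eq_of_lt (by omega)
            omega
          · have heq : l.length + m - 1 = (l.length - m + m - 1) + m := by omega
            rw [heq, Nat.add_div_right _ hm]
        rw [hq, List.range_succ_eq_map]
        simp only [List.map_cons, List.map_map]
        refine congrArg₂ List.cons (by simp) ?_
        apply List.map_congr_left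
        intro i _
        simp only [Function.comp_apply]
        rw [List.drop_drop]
        congr 2
        rw [Nat.succ_mul]
        omega
  exact aux l.length l le_rfl

theorem pv_chunk_length (m : Nat) (hm : 0 < m) (l : List Char) :
    (pvChunk m l).length = (l.length + m - 1) / m := by
  rw [pv_chunk_map m hm]; simp

theorem pv_chunk_block_le (m : Nat) (hm : 0 < m) (l : List Char) :
    ∀ b ∈ pvChunk m l, b.length ≤ m := by
  rw [pv_chunk_map m hm]
  intro b hb
  obtain ⟨i, _, rfl⟩ := List.mem_map.mp hb
  exact le_trans (List.length_take_le _ _) (le_refl m)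

theorem pv_chunk_mem_mem (m : Nat) (hm : 0 < m) (l : List Char) :
    ∀ b ∈ pvChunk m l, ∀ x ∈ b, x ∈ l := by
  rw [pv_chunk_map m hm]
  intro b hb x hx
  obtain ⟨i, _, rfl⟩ := List.mem_map.mp hb
  exact List.mem_of_mem_drop (List.mem_of_mem_take hx)

-- chunking commutes with a per-character map
theorem pv_chunk_map_comm (m : Nat) (hm : 0 < m) (f : Char → Char) (l : List Char) :
    pvChunk m (l.map f) = (pvChunk m l).map (List.map f) := by
  rw [pv_chunk_map m hm, pv_chunk_map m hm, List.map_map, List.length_map]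
  apply List.map_congr_left
  intro i _
  simp [Function.comp_apply, List.map_take, List.map_drop]

-- self-set is a no-op
theorem pv_set_getD_self (l : List (List Char)) (i : Nat) : l.set i (l.getD i []) = l := by
  by_cases h : i < l.length
  · rw [List.getD_eq_getElem l [] h]; exact List.set_getElem_self h
  · exact List.set_eq_of_length_le (Nat.le_of_not_lt h)

-- a loop appending chars one by one to the SAME slot
theorem pv_fold_set {ι : Type} (l : List ι) (f : ι → Char) (i : Nat) :
    ∀ CB : List (List Char),
      l.foldl (fun cb j => cb.set i (cb.getD i [] ++ [f j])) CB
        = CB.set i (CB.getD i [] ++ l.map f) := by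
  induction l with
  | nil =>
    intro CB
    rw [List.foldl_nil, List.map_nil, List.append_nil, pv_set_getD_self]
  | cons a l ih =>
    intro CB
    simp only [List.foldl_cons, List.map_cons]
    rw [ih]
    by_cases hi : i < CB.length
    · have hget : (CB.set i (CB.getD i [] ++ [f a])).getD i [] = CB.getD i [] ++ [f a] := by
        rw [List.getD_eq_getElem _ [] (by simpa using hi)]
        exact List.getElem_set_self (by simpa using hi)
      rw [hget, List.set_set, List.append_assoc]
      rfl
    · have hfa : CB.set i (CB.getD i [] ++ [f a]) = CB := List.set_eq_of_length_le (by omega)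
      have h2 : CB.set i (CB.getD i [] ++ (f a :: l.map f)) = CB := List.set_eq_of_length_le (by omega)
      rw [hfa, h2]
      exact List.set_eq_of_length_le (by omega)

-- setting the slot just after a prefix
theorem pv_set_append {α : Type} (A : List α) (b v : α) (B : List α) :
    (A ++ b :: B).set A.length v = A ++ v :: B := by
  induction A with
  | nil => rfl
  | cons a A ih => simp [List.set_cons_succ, ih]

-- A's inner block-filling loop
theorem pv_inner_fill (L : List Char) (i : Nat) :
    ∀ (k : Nat) (CB : List (List Char)) (d : Nat), d ≤ L.length → i < CB.length →
      (List.range k).foldl (fun st _j =>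
          if st.2 < L.length then (st.1.set i (st.1.getD i [] ++ [L.getD st.2 ' ']), st.2 + 1)
          else st) (CB, d)
        = (CB.set i (CB.getD i [] ++ (L.drop d).take (min k (L.length - d))), min (d + k) L.length) := by
  intro k CB d hd hi
  induction k with
  | zero =>
    simp only [List.range_zero, List.foldl_nil, Nat.zero_min, List.take_zero, List.append_nil]
    rw [pv_set_getD_self, Nat.add_zero, Nat.min_eq_left hd]
  | succ k ih =>
    rw [List.range_succ, List.foldl_append, ih, List.foldl_cons, List.foldl_nil]
    by_cases hdk : d + k < L.length
    · have hmin1 : min (d + k) L.length = d + k := by omega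
      have hmin2 : min k (L.length - d) = k := by omega
      have hmin3 : min (k + 1) (L.length - d) = k + 1 := by omega
      rw [hmin1, hmin2, hmin3]
      dsimp only
      rw [if_pos hdk]
      have hset : i < (CB.set i (CB.getD i [] ++ (L.drop d).take k)).length := by
        simpa using hi
      rw [List.getD_eq_getElem _ [] hset, List.getElem_set_self hset, List.set_set,
        List.append_assoc]
      have htk : (L.drop d).take (k + 1) = (L.drop d).take k ++ [L.getD (d + k) ' '] := by
        rw [List.take_add_one]
        have h1 : k < (L.drop d).length := by simp only [List.length_drop]; omega
        rw [List.getElem?_eq_getElem h1]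
        simp only [Option.toList_some]
        congr 1
        rw [List.getElem_drop, List.getD_eq_getElem L ' ' (show d + k < L.length from hdk)]
      rw [htk]
      have : min (d + (k + 1)) L.length = d + k + 1 := by omega
      rw [this]
    · have hmin1 : min (d + k) L.length = L.length := by omega
      have hmin2 : min (k + 1) (L.length - d) = min k (L.length - d) := by omega
      have hmin3 : min (d + (k + 1)) L.length = L.length := by omega
      rw [hmin1, hmin2, hmin3]
      dsimp only
      rw [if_neg (lt_irrefl _)]

-- A's block-filling loops build exactly the chunks
theorem pv_outer_fill (L : List Char) (m : Nat) (hm : 0 < m) :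
    ((List.range ((L.length + m - 1) / m)).foldl (fun (st : List (List Char) × Nat) i =>
        (List.range m).foldl (fun st _j =>
          if st.2 < L.length then (st.1.set i (st.1.getD i [] ++ [L.getD st.2 ' ']), st.2 + 1)
          else st) st) (List.replicate ((L.length + m - 1) / m) ([] : List Char), 0)).1
      = pvChunk m L := by
  have hC := pv_chunk_map m hm L
  have hClen : (pvChunk m L).length = (L.length + m - 1) / m := pv_chunk_length m hm L
  have hdiv : ((L.length + m - 1) / m) * m ≤ L.length + m - 1 := Nat.div_mul_le_self _ _
  have key : ∀ t, t ≤ (L.length + m - 1) / m →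
      (List.range t).foldl (fun (st : List (List Char) × Nat) i =>
        (List.range m).foldl (fun st _j =>
          if st.2 < L.length then (st.1.set i (st.1.getD i [] ++ [L.getD st.2 ' ']), st.2 + 1)
          else st) st) (List.replicate ((L.length + m - 1) / m) ([] : List Char), 0)
      = ((pvChunk m L).take t ++ List.replicate ((L.length + m - 1) / m - t) [],
          min (t * m) L.length) := by
    intro t
    induction t with
    | zero => intro _; simp
    | succ t ih =>
      intro ht
      rw [List.range_succ, List.foldl_append, ih (by omega), List.foldl_cons, List.foldl_nil]
      have hn1 : 0 < L.length := by
        by_contra h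
        have h0 : L.length = 0 := by omega
        have : (L.length + m - 1) / m = 0 := by
          rw [h0]; exact Nat.div_eq_of_lt (by omega)
        omega
      have htm : t * m + m ≤ ((L.length + m - 1) / m) * m := by
        have h2 := Nat.mul_le_mul_right m (show t + 1 ≤ (L.length + m - 1) / m from ht)
        rwa [Nat.succ_mul] at h2
      have htn : t * m < L.length := by omega
      have hd : min (t * m) L.length = t * m := by omega
      rw [hd]
      have hCBlen : ((pvChunk m L).take t ++
          List.replicate ((L.length + m - 1) / m - t) ([] : List Char)).length
          = (L.length + m - 1) / m := by
        simp only [List.length_append, List.length_take, List.length_replicate, hClen]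
        omega
      have hi : t < ((pvChunk m L).take t ++
          List.replicate ((L.length + m - 1) / m - t) ([] : List Char)).length := by
        rw [hCBlen]; omega
      rw [pv_inner_fill L t m _ (t * m) (by omega) hi]
      have htaket : ((pvChunk m L).take t).length = t := by
        simp only [List.length_take, hClen]; omega
      have hgetD : ((pvChunk m L).take t ++
          List.replicate ((L.length + m - 1) / m - t) ([] : List Char)).getD t [] = [] := by
        rw [List.getD_eq_getElem _ [] hi, List.getElem_append_right (by omega)]
        simp
      rw [hgetD, List.nil_append]
      have hslot : (L.drop (t * m)).take (min m (L.length - t * m)) = (L.drop (t * m)).take m := by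
        by_cases hmm : m ≤ L.length - t * m
        · rw [min_eq_left hmm]
        · rw [min_eq_right (by omega)]
          rw [List.take_of_length_le (by simp only [List.length_drop]; omega),
            List.take_of_length_le (by simp only [List.length_drop]; omega)]
      have hCt : (pvChunk m L)[t]'(by omega) = (L.drop (t * m)).take m := by
        simp only [hC, List.getElem_map, List.getElem_range]
      refine congrArg₂ Prod.mk ?_ ?_
      · rw [hslot, ← hCt]
        have hq2 : (L.length + m - 1) / m - t = ((L.length + m - 1) / m - (t + 1)) + 1 := by omega
        rw [hq2, List.replicate_succ]
        have := pv_set_append ((pvChunk m L).take t) ([] : List Char)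
          ((pvChunk m L)[t]'(by omega)) (List.replicate ((L.length + m - 1) / m - (t + 1)) [])
        rw [htaket] at this
        rw [this]
        have htk1 : (pvChunk m L).take (t + 1)
            = (pvChunk m L).take t ++ [(pvChunk m L)[t]'(by omega)] := by
          rw [List.take_add_one, List.getElem?_eq_getElem (show t < (pvChunk m L).length by omega)]
          rfl
        rw [htk1, List.append_assoc]
        rfl
      · rw [Nat.succ_mul]
  have hfin := key ((L.length + m - 1) / m) le_rfl
  rw [hfin]
  simp only [Nat.sub_self, List.replicate_zero, List.append_nil]
  rw [← hClen, List.take_length]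

-- per-block ciphertext: index loop = zip with the key
theorem pv_cipher_map (b key : List Char) (hb : b.length ≤ key.length) :
    (List.range b.length).map (fun j => pvShift (pvIdx (key.getD j ' ')) (b.getD j ' '))
      = pvCipher key b := by
  have hlen : (b.zip key).length = b.length := by rw [List.length_zip]; omega
  apply List.ext_getElem (by simp [pvCipher, hlen])
  intro j h1 h2
  have hj1 : j < b.length := by simpa using h1
  have hj2 : j < key.length := by omega
  simp only [pvCipher, List.getElem_map, List.getElem_range, List.getElem_zip]
  rw [List.getD_eq_getElem b ' ' hj1, List.getD_eq_getElem key ' ' hj2]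

-- A's distribution step (named for the lemmas below)
def pvStep (bs : List (List Char)) (key : List Char) (cb : List (List Char)) (blk : List Char) : List (List Char) :=
  cb.set ((PySem.List.index? bs blk).getD 0)
    (cb.getD ((PySem.List.index? bs blk).getD 0) [] ++ pvCipher key blk)

-- A's distribution loop: slot k of the result, by first-occurrence index and count
theorem pv_cipher_fold (bs : List (List Char)) (key : List Char) :
    ∀ (suf pre : List (List Char)), pre ++ suf = bs →
      ∀ CB : List (List Char), CB.length = bs.length →
        (∀ k, k < bs.length → CB.getD k [] =
          if PySem.List.index? bs (bs.getD k []) == some k then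
            (List.replicate (pre.count (bs.getD k [])) (pvCipher key (bs.getD k []))).flatten
          else []) →
        (suf.foldl (pvStep bs key) CB).length = bs.length ∧
        ∀ k, k < bs.length → (suf.foldl (pvStep bs key) CB).getD k [] =
          if PySem.List.index? bs (bs.getD k []) == some k then
            (List.replicate ((pre ++ suf).count (bs.getD k [])) (pvCipher key (bs.getD k []))).flatten
          else [] := by
  intro suf
  induction suf with
  | nil =>
    intro pre hpre CB hlen hinv
    simp only [List.foldl_nil, List.append_nil]
    exact ⟨hlen, hinv⟩
  | cons blk suf ih =>
    intro pre hpre CB hlen hinv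
    rw [List.foldl_cons]
    have hmem : blk ∈ bs := by
      rw [← hpre]; exact List.mem_append.mpr (Or.inr (List.mem_cons_self ..))
    obtain ⟨k0, hk0⟩ : ∃ k0, PySem.List.index? bs blk = some k0 := by
      cases h : PySem.List.index? bs blk with
      | none => exact absurd hmem ((PySem.List.index?_eq_none_iff bs blk).mp h)
      | some k0 => exact ⟨k0, rfl⟩
    obtain ⟨hk0lt, hbsk0, _hfirst⟩ := PySem.List.getElem_of_index?_eq_some hk0
    have hgk0 : bs.getD k0 [] = blk := by
      rw [List.getD_eq_getElem bs [] hk0lt]; exact hbsk0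
    have hCBk0 : CB.getD k0 [] = (List.replicate (pre.count blk) (pvCipher key blk)).flatten := by
      have h2 := hinv k0 (by omega)
      rw [hgk0] at h2
      rwa [if_pos (by rw [hk0]; simp)] at h2
    have hstep : pvStep bs key CB blk =
        CB.set k0 ((List.replicate ((pre ++ [blk]).count blk) (pvCipher key blk)).flatten) := by
      rw [pvStep, hk0, Option.getD_some, hCBk0]
      congr 1
      rw [List.count_append, List.count_singleton, if_pos (by simp), List.replicate_add]
      simp
    rw [hstep]
    have happ : (pre ++ [blk]) ++ suf = bs := by simpa using hpre
    have hres := ih (pre ++ [blk]) happ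
      (CB.set k0 ((List.replicate ((pre ++ [blk]).count blk) (pvCipher key blk)).flatten))
      (by simpa using hlen)
      (by
        intro k hk
        by_cases hkk : k = k0
        · subst hkk
          rw [hgk0]
          rw [if_pos (by rw [hk0]; simp)]
          rw [List.getD_eq_getElem _ [] (by simp only [List.length_set]; omega)]
          exact List.getElem_set_self (by simp only [List.length_set]; omega)
        · have hklen : k < CB.length := by omega
          have hgetne : (CB.set k0
              ((List.replicate ((pre ++ [blk]).count blk) (pvCipher key blk)).flatten)).getD k []
              = CB.getD k [] := by
            rw [List.getD_eq_getElem _ [] (by simp only [List.length_set]; omega),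
              List.getElem_set_ne (by omega), ← List.getD_eq_getElem CB [] hklen]
          rw [hgetne, hinv k hk]
          by_cases hcond : (PySem.List.index? bs (bs.getD k []) == some k) = true
          · rw [if_pos hcond, if_pos hcond]
            have hne : blk ≠ bs.getD k [] := by
              intro heq
              rw [← heq, hk0] at hcond
              simp only [beq_iff_eq, Option.some.injEq] at hcond
              omega
            rw [List.count_append, List.count_singleton, if_neg (by simpa using hne)]
            simp
          · rw [if_neg hcond, if_neg hcond])
    have hassoc : (pre ++ [blk]) ++ suf = pre ++ blk :: suf := by simp
    rw [hassoc] at hres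
    exact hres

-- a list of known entries is a map over range
theorem pv_eq_map_range (CB : List (List Char)) (N : Nat) (h : CB.length = N)
    (f : Nat → List Char) (hf : ∀ k, k < N → CB.getD k [] = f k) :
    CB = (List.range N).map f := by
  apply List.ext_getElem (by simp [h])
  intro k hk _
  have hkN : k < N := by simpa [h] using hk
  rw [← List.getD_eq_getElem CB [] hk, hf k hkN]
  simp [List.getElem_range]

-- first-occurrence indices enumerate set(bs) in order
theorem pv_first_ofList (bs : List (List Char)) :
    ((List.range bs.length).filter (fun k =>
        PySem.List.index? bs (bs.getD k []) == some k)).map (fun k => bs.getD k [])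
      = PySem.Set.ofList bs := by
  induction bs using List.reverseRecOn with
  | nil => rfl
  | append_singleton bs x ih =>
    have hfr : ∀ k ∈ List.range bs.length,
        ((PySem.List.index? (bs ++ [x]) ((bs ++ [x]).getD k []) == some k) : Bool)
          = (PySem.List.index? bs (bs.getD k []) == some k) := by
      intro k hk
      have hklt : k < bs.length := List.mem_range.mp hk
      have hg : (bs ++ [x]).getD k [] = bs.getD k [] := by
        rw [List.getD_eq_getElem _ [] (by simp; omega), List.getElem_append_left hklt,
          ← List.getD_eq_getElem bs [] hklt]
      rw [hg, PySem.List.index?_append_of_mem _ (by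
        rw [List.getD_eq_getElem bs [] hklt]; exact List.getElem_mem hklt)]
    have hlen1 : (bs ++ [x]).length = bs.length + 1 := by simp
    rw [hlen1, List.range_succ, List.filter_append, List.map_append,
      List.filter_congr hfr]
    have hmapfr : (((List.range bs.length).filter (fun k =>
        PySem.List.index? bs (bs.getD k []) == some k)).map (fun k => (bs ++ [x]).getD k []))
        = (((List.range bs.length).filter (fun k =>
        PySem.List.index? bs (bs.getD k []) == some k)).map (fun k => bs.getD k [])) := by
      apply List.map_congr_left
      intro k hkmem
      have hklt : k < bs.length := List.mem_range.mp (List.mem_of_mem_filter hkmem)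
      rw [List.getD_eq_getElem _ [] (by simp; omega), List.getElem_append_left hklt,
        ← List.getD_eq_getElem bs [] hklt]
    rw [hmapfr, ih, PySem.Set.ofList_append_singleton]
    have hgx : (bs ++ [x]).getD bs.length [] = x := by
      rw [List.getD_eq_getElem _ [] (by simp), List.getElem_append_right (by omega)]
      simp
    by_cases hx : x ∈ bs
    · obtain ⟨jx, hjx⟩ : ∃ jx, PySem.List.index? bs x = some jx := by
        cases h : PySem.List.index? bs x with
        | none => exact absurd hx ((PySem.List.index?_eq_none_iff bs x).mp h)
        | some jx => exact ⟨jx, rfl⟩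
      obtain ⟨hjxlt, _, _⟩ := PySem.List.getElem_of_index?_eq_some hjx
      have hcond : ((PySem.List.index? (bs ++ [x]) ((bs ++ [x]).getD bs.length []) ==
          some bs.length) : Bool) = false := by
        rw [hgx, PySem.List.index?_append_of_mem _ hx, hjx]
        simp only [beq_eq_false_iff_ne, ne_eq, Option.some.injEq]
        omega
      rw [List.filter_singleton, hcond]
      simp [PySem.Set.add_of_mem ((PySem.Set.mem_ofList bs x).mpr hx)]
    · have hcond : ((PySem.List.index? (bs ++ [x]) ((bs ++ [x]).getD bs.length []) ==
          some bs.length) : Bool) = true := by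
        rw [hgx, PySem.List.index?_append_singleton_self bs x hx]
        simp
      rw [List.filter_singleton, hcond]
      simp [PySem.Set.add_of_not_mem (fun h => hx ((PySem.Set.mem_ofList bs x).mp h))]

-- flatten ignores the [] entries
theorem pv_flatten_ite {ι : Type} (l : List ι) (p : ι → Bool) (F : ι → List Char) :
    (l.map (fun k => if p k then F k else [])).flatten = ((l.filter p).map F).flatten := by
  induction l with
  | nil => rfl
  | cons a l ih => by_cases h : p a <;> simp [h, ih]

-- rfl bridge from the ports' inline expression to the proof-side name
theorem pv_shift_fun (k : Int) (c : Char) :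
    PySem.List.pyGetD pvAlpha
      (PySem.Int.mod (((PySem.List.index? pvAlpha c).getD 0 : Int) + k) 26) ' ' = pvShift k c := rfl

-- A's whole distribution loop rewritten to pvStep
theorem pv_A_cipher (bs : List (List Char)) (key : List Char)
    (hble : ∀ blk ∈ bs, blk.length ≤ key.length) (CB : List (List Char)) :
    bs.foldl (fun cb blk =>
      (List.range blk.length).foldl (fun cb j =>
        cb.set ((PySem.List.index? bs blk).getD 0)
          (cb.getD ((PySem.List.index? bs blk).getD 0) [] ++
            [pvShift (((PySem.List.index? pvAlpha (key.getD j ' ')).getD 0 : Int))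
              (blk.getD j ' ')])) cb) CB
    = bs.foldl (pvStep bs key) CB := by
  apply PySem.List.foldl_congr_mem
  intro acc blk hblk
  rw [pv_fold_set]
  rw [pvStep]
  congr 1
  rw [← pv_cipher_map blk key (hble blk hblk)]
  rfl

-- ===== lemmas for the B side and the D_ region =====

-- the flattened per-block index maps are one indexed pass with j = k mod m
theorem pv_chunk_zipmap (m : Nat) (hm : 0 < m) (φ : Nat → Char → Char) :
    ∀ L : List Char,
      ((pvChunk m L).map (fun b => (List.range b.length).map (fun j => φ j (b.getD j ' ')))).flatten
        = (List.range L.length).map (fun k => φ (k % m) (L.getD k ' ')) := by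
  have aux : ∀ (fuel : Nat) (L : List Char), L.length ≤ fuel →
      ((pvChunk m L).map (fun b => (List.range b.length).map (fun j => φ j (b.getD j ' ')))).flatten
        = (List.range L.length).map (fun k => φ (k % m) (L.getD k ' ')) := by
    intro fuel
    induction fuel with
    | zero =>
      intro L hL
      have : L = [] := List.eq_nil_of_length_eq_zero (Nat.le_zero.mp hL)
      subst this
      rw [pv_chunk_eq]
      simp
    | succ fuel ih =>
      intro L hL
      by_cases hnil : L = []
      · subst hnil; rw [pv_chunk_eq]; simp
      · rw [pv_chunk_eq, if_neg (by simp [hnil]; omega)]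
        have hlen : 0 < L.length := List.length_pos_iff.mpr hnil
        simp only [List.map_cons, List.flatten_cons]
        rw [ih (L.drop m) (by simp only [List.length_drop]; omega)]
        by_cases hle : L.length ≤ m
        · have hdrop : L.drop m = [] := List.drop_eq_nil_iff.mpr hle
          have htake : L.take m = L := List.take_of_length_le hle
          rw [hdrop, htake]
          simp only [List.length_nil, List.range_zero, List.map_nil, List.append_nil]
          apply List.map_congr_left
          intro k hk
          have hkm : k < m := lt_of_lt_of_le (List.mem_range.mp hk) hle
          rw [Nat.mod_eq_of_lt hkm]
        · have htlen : (L.take m).length = m := List.length_take_of_le (by omega)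
          have hsplit : L.length = m + (L.length - m) := by omega
          rw [htlen, hsplit, List.range_add, List.map_append, List.map_map]
          congr 1
          · apply List.map_congr_left
            intro j hj
            have hjm : j < m := List.mem_range.mp hj
            rw [Nat.mod_eq_of_lt hjm]
            congr 1
            rw [List.getD_eq_getElem _ ' ' (by omega), List.getD_eq_getElem _ ' ' (by omega),
              List.getElem_take]
          · simp only [List.length_drop]
            apply List.map_congr_left
            intro k hk
            have hkb : k < L.length - m := List.mem_range.mp hk
            simp only [Function.comp_apply]
            rw [Nat.add_mod_left]
            congr 1
            rw [List.getD_eq_getElem _ ' ' (by simp only [List.length_drop]; omega),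
              List.getD_eq_getElem _ ' ' (by omega), List.getElem_drop]
  exact fun L => aux L.length L le_rfl

-- B's enumerate-map as a map over range
theorem pv_enum_map (L : List Char) (f : Int × Char → Char) :
    (PySem.List.enumerate L).map f
      = (List.range L.length).map (fun k : Nat => f (((k : Nat) : Int), L.getD k ' ')) := by
  apply List.ext_getElem (by simp [PySem.List.length_enumerate])
  intro k h1 h2
  have hk : k < L.length := by simpa [PySem.List.length_enumerate] using h1
  simp only [List.getElem_map, List.getElem_range, PySem.List.getElem_enumerate]
  rw [List.getD_eq_getElem L ' ' hk]
  norm_num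

-- under Pre_, B's filtered key agrees with A's raw key on every reachable offset
theorem pv_key_prefix (K2 : List Char) (t : Nat)
    (h : ∀ j, j < t → pvAlpha.contains (K2.getD j ' ')) :
    ∀ j, j < t →
      ((K2.filter (fun c => pvAlpha.contains c)).map
          (fun c => (((PySem.List.index? pvAlpha c).getD 0 : Nat) : Int))).getD j 0
        = pvIdx (K2.getD j ' ') := by
  have ht : t ≤ K2.length := by
    by_contra hgt
    have h1 := h K2.length (by omega)
    rw [List.getD_eq_default _ ' ' le_rfl] at h1
    exact absurd h1 (by decide)
  have htake : ∀ x ∈ K2.take t, pvAlpha.contains x = true := by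
    intro x hx
    obtain ⟨j, hj, rfl⟩ := List.mem_take_iff_getElem.mp hx
    have hjt : j < t := by omega
    have := h j hjt
    rwa [List.getD_eq_getElem K2 ' ' (by omega)] at this
  have hfil : K2.filter (fun c => pvAlpha.contains c)
      = K2.take t ++ (K2.drop t).filter (fun c => pvAlpha.contains c) := by
    conv_lhs => rw [← List.take_append_drop t K2]
    rw [List.filter_append, List.filter_eq_self.mpr htake]
  intro j hj
  have hjl : j < ((K2.take t).map
      (fun c => (((PySem.List.index? pvAlpha c).getD 0 : Nat) : Int))).length := by
    simp only [List.length_map, List.length_take]; omega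
  have hjlen2 : j < (((K2.take t).map
        (fun c => (((PySem.List.index? pvAlpha c).getD 0 : Nat) : Int))) ++
      (((K2.drop t).filter (fun c => pvAlpha.contains c)).map
        (fun c => (((PySem.List.index? pvAlpha c).getD 0 : Nat) : Int)))).length := by
    simp only [List.length_append, List.length_map, List.length_take]
    omega
  rw [hfil, List.map_append, List.getD_eq_getElem _ 0 hjlen2,
    List.getElem_append_left hjl]
  simp only [List.getElem_map, List.getElem_take]
  rw [List.getD_eq_getElem K2 ' ' (by omega)]
  rfl

-- alpha.index followed by alpha[...] round-trips on the alphabet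
theorem pv_index_spec (c : Char) (hc : c ∈ pvAlpha) :
    ∃ i : Nat, PySem.List.index? pvAlpha c = some i ∧ i < 26 ∧ pvAlpha.getD i ' ' = c := by
  obtain ⟨i, hi⟩ : ∃ i, PySem.List.index? pvAlpha c = some i := by
    cases h : PySem.List.index? pvAlpha c with
    | none => exact absurd hc ((PySem.List.index?_eq_none_iff pvAlpha c).mp h)
    | some i => exact ⟨i, rfl⟩
  obtain ⟨hlt, hget, _⟩ := PySem.List.getElem_of_index?_eq_some hi
  exact ⟨i, hi, by have := pv_alpha_len; omega,
    by rw [List.getD_eq_getElem pvAlpha ' ' hlt]; exact hget⟩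

-- the Caesar shift is injective on the alphabet
theorem pv_shift_inj (k : Int) {c d : Char} (hc : c ∈ pvAlpha) (hd : d ∈ pvAlpha)
    (h : pvShift k c = pvShift k d) : c = d := by
  obtain ⟨a, ha, halt, hag⟩ := pv_index_spec c hc
  obtain ⟨b, hb, hblt, hbg⟩ := pv_index_spec d hd
  have hidxc : pvIdx c = (a : Int) := by unfold pvIdx; rw [ha]; rfl
  have hidxd : pvIdx d = (b : Int) := by unfold pvIdx; rw [hb]; rfl
  have h26 : (0 : Int) < 26 := by norm_num
  have hm1 := PySem.Int.mod_nonneg (pvIdx c + k) h26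
  have hm2 := PySem.Int.mod_lt (pvIdx c + k) h26
  have hm3 := PySem.Int.mod_nonneg (pvIdx d + k) h26
  have hm4 := PySem.Int.mod_lt (pvIdx d + k) h26
  have hat : ∀ v : Int, 0 ≤ v → pvAt v = pvAlpha.getD v.toNat ' ' := by
    intro v hv1
    conv_lhs => rw [pvAt, show v = ((v.toNat : Nat) : Int) from by omega]
    rw [PySem.List.pyGetD_natCast]
  have heq : pvAlpha.getD (PySem.Int.mod (pvIdx c + k) 26).toNat ' '
      = pvAlpha.getD (PySem.Int.mod (pvIdx d + k) 26).toNat ' ' := by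
    rw [← hat _ hm1, ← hat _ hm3]
    exact h
  rw [List.getD_eq_getElem pvAlpha ' ' (by rw [pv_alpha_len]; omega),
    List.getD_eq_getElem pvAlpha ' ' (by rw [pv_alpha_len]; omega)] at heq
  have htn : (PySem.Int.mod (pvIdx c + k) 26).toNat = (PySem.Int.mod (pvIdx d + k) 26).toNat :=
    (List.Nodup.getElem_inj_iff pv_alpha_nodup).mp heq
  have hmodeq : PySem.Int.mod (pvIdx c + k) 26 = PySem.Int.mod (pvIdx d + k) 26 := by omega
  rw [PySem.Int.mod_eq_emod_of_pos h26, PySem.Int.mod_eq_emod_of_pos h26] at hmodeq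
  have hdvd : (26 : Int) ∣ (pvIdx d + k) - (pvIdx c + k) := Int.ModEq.dvd hmodeq
  have hab : a = b := by
    rw [hidxc, hidxd] at hdvd
    omega
  rw [← hag, ← hbg, hab]

-- mapping the shift over blocks is injective on blocks drawn from the alphabet
theorem pv_map_shift_inj (k : Int) :
    ∀ (b b' : List Char), (∀ x ∈ b, x ∈ pvAlpha) → (∀ x ∈ b', x ∈ pvAlpha) →
      b.map (pvShift k) = b'.map (pvShift k) → b = b' := by
  intro b
  induction b with
  | nil =>
    intro b' _ _ h
    cases b' with
    | nil => rfl
    | cons y t => simp at h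
  | cons x t ih =>
    intro b' hb hb' h
    cases b' with
    | nil => simp at h
    | cons y t' =>
      simp only [List.map_cons, List.cons.injEq] at h
      have hx : x = y := pv_shift_inj k (hb x (by simp)) (hb' y (by simp)) h.1
      have ht : t = t' := ih t' (fun z hz => hb z (by simp [hz]))
        (fun z hz => hb' z (by simp [hz])) h.2
      rw [hx, ht]

-- "equal blocks are never separated by a different block"
def pvGrouped (bs : List (List Char)) : Prop :=
  ∀ i j k : Nat, i < j → j < k → k < bs.length →
    bs.getD i [] = bs.getD k [] → bs.getD i [] = bs.getD j []

-- foldl Set.add leaves an already-collected prefix alone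
theorem pv_foldl_add_prefix (l : List (List Char)) :
    ∀ a b : List (List Char), (∀ y ∈ l, y ∉ a) →
      l.foldl PySem.Set.add (a ++ b) = a ++ l.foldl PySem.Set.add b := by
  induction l with
  | nil => intro a b _; simp
  | cons y l ih =>
    intro a b hna
    simp only [List.foldl_cons]
    by_cases hyb : y ∈ b
    · have h1 : PySem.Set.add (a ++ b) y = a ++ b :=
        PySem.Set.add_of_mem (List.mem_append.mpr (Or.inr hyb))
      have h2 : PySem.Set.add b y = b := PySem.Set.add_of_mem hyb
      rw [h1, h2]
      exact ih a b (fun z hz => hna z (by simp [hz]))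
    · have hya : y ∉ a := hna y (by simp)
      have h1 : PySem.Set.add (a ++ b) y = (a ++ b) ++ [y] :=
        PySem.Set.add_of_not_mem (by
          intro hy
          rcases List.mem_append.mp hy with h | h
          · exact hya h
          · exact hyb h)
      have h2 : PySem.Set.add b y = b ++ [y] := PySem.Set.add_of_not_mem hyb
      rw [h1, h2, List.append_assoc]
      exact ih a (b ++ [y]) (fun z hz => hna z (by simp [hz]))

theorem pv_foldl_add_replicate (x : List Char) :
    ∀ (n : Nat) (s : List (List Char)), x ∈ s →
      (List.replicate n x).foldl PySem.Set.add s = s := by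
  intro n
  induction n with
  | zero => intro s _; rfl
  | succ n ih =>
    intro s hs
    rw [List.replicate_succ, List.foldl_cons, PySem.Set.add_of_mem hs]
    exact ih s hs

theorem pv_ofList_replicate_append (n : Nat) (x : List Char) (rest : List (List Char))
    (hx : x ∉ rest) :
    PySem.Set.ofList (List.replicate (n + 1) x ++ rest) = x :: PySem.Set.ofList rest := by
  have hof : ∀ l : List (List Char), PySem.Set.ofList l = l.foldl PySem.Set.add [] :=
    fun l => rfl
  rw [hof, List.foldl_append]
  have hrep : (List.replicate (n + 1) x).foldl PySem.Set.add ([] : List (List Char)) = [x] := by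
    rw [List.replicate_succ, List.foldl_cons]
    have h0 : PySem.Set.add ([] : List (List Char)) x = [x] :=
      PySem.Set.add_of_not_mem (by simp)
    rw [h0]
    exact pv_foldl_add_replicate x n [x] (by simp)
  rw [hrep]
  have := pv_foldl_add_prefix rest [x] []
    (by intro y hy; simp only [List.mem_singleton]; intro hyx; exact hx (hyx ▸ hy))
  simpa [hof] using this

-- getD after a known prefix
theorem pv_getD_append_right {α : Type} (l l' : List α) (i : Nat) (d : α) :
    (l ++ l').getD (l.length + i) d = l'.getD i d := by
  by_cases h : i < l'.length
  · rw [List.getD_eq_getElem _ d (by simp only [List.length_append]; omega),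
      List.getD_eq_getElem l' d h, List.getElem_append_right (by omega)]
    congr 1
    omega
  · rw [List.getD_eq_default _ d (by simp only [List.length_append]; omega),
      List.getD_eq_default l' d (by omega)]

-- on a grouped block list, grouping by first occurrence is the identity on the flattening
theorem pv_grouped_flatten (F : List Char → List Char) :
    ∀ (fuel : Nat) (bs : List (List Char)), bs.length ≤ fuel → pvGrouped bs →
      ((PySem.Set.ofList bs).map
          (fun b => (List.replicate (bs.count b) (F b)).flatten)).flatten
        = (bs.map F).flatten := by
  intro fuel
  induction fuel with
  | zero =>
    intro bs hbs _
    have : bs = [] := List.eq_nil_of_length_eq_zero (Nat.le_zero.mp hbs)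
    subst this; rfl
  | succ fuel ih =>
    intro bs hbs hG
    cases hbse : bs with
    | nil => rfl
    | cons x t =>
      subst hbse
      set p : List Char → Bool := fun y => y == x with hp
      set run := (x :: t).takeWhile p with hrun
      set rest := (x :: t).dropWhile p with hrest
      have hsplit : run ++ rest = x :: t := List.takeWhile_append_dropWhile
      have hrunx : ∀ y ∈ run, y = x := by
        intro y hy
        have := List.mem_takeWhile_imp hy
        simpa [hp] using this
      have hrun1 : run = x :: t.takeWhile p := by
        rw [hrun, List.takeWhile_cons_of_pos (by simp [hp])]
      have hn1 : 0 < run.length := by rw [hrun1]; simp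
      have hrep : run = List.replicate run.length x :=
        List.eq_replicate_iff.mpr ⟨rfl, hrunx⟩
      have hrest0 : ∀ (y : List Char) (r' : List (List Char)), rest = y :: r' → y ≠ x := by
        intro y r' hcase
        have hdw : (x :: t).dropWhile p = y :: r' := by rw [← hrest]; exact hcase
        have hne : (x :: t).dropWhile p ≠ [] := by rw [hdw]; simp
        have hhd := List.head_dropWhile_not p hne
        have hhy : ((x :: t).dropWhile p).head hne = y := by simp [hdw]
        rw [hhy] at hhd
        intro hyx
        rw [hyx] at hhd
        simp [hp] at hhd
      have hxrest : x ∉ rest := by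
        cases hcase : rest with
        | nil => simp
        | cons y r' =>
          intro hxin
          have hy : y ≠ x := hrest0 y r' hcase
          obtain ⟨s, hslt, hsx⟩ := List.getElem_of_mem hxin
          have hx' : rest.getD s [] = x := by
            rw [hcase, List.getD_eq_getElem _ [] hslt]
            exact hsx
          have hs1 : 0 < s := by
            rcases Nat.eq_zero_or_pos s with h0 | h0
            · exfalso; apply hy; subst h0; simpa using hsx
            · exact h0
          have hg0 : (x :: t).getD 0 [] = x := rfl
          have hgk : (x :: t).getD (run.length + s) [] = x := by
            rw [← hsplit, pv_getD_append_right]; exact hx'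
          have hgj : (x :: t).getD run.length [] = y := by
            have h5 := pv_getD_append_right run rest 0 ([] : List Char)
            rw [hsplit] at h5
            simpa [hcase] using h5
          have hklen : run.length + s < (x :: t).length := by
            have hl1 : (x :: t).length = run.length + rest.length := by
              rw [← hsplit, List.length_append]
            have hl2 : s < rest.length := by rw [hcase]; exact hslt
            omega
          have h6 := hG 0 run.length (run.length + s) hn1 (by omega) hklen (by rw [hg0, hgk])
          rw [hg0, hgj] at h6
          exact hy h6.symm
      have hcx : (x :: t).count x = run.length := by
        rw [← hsplit, List.count_append]
        have h1 : run.count x = run.length := by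
          rw [hrep, List.count_replicate]; simp
        have h2 : rest.count x = 0 := List.count_eq_zero.mpr hxrest
        omega
      have hcb : ∀ b, b ≠ x → (x :: t).count b = rest.count b := by
        intro b hb
        rw [← hsplit, List.count_append]
        have h1 : run.count b = 0 := by
          rw [hrep, List.count_replicate, if_neg (by simpa using Ne.symm hb)]
        omega
      have hGrest : pvGrouped rest := by
        intro i j k hij hjk hk hik
        have hlen : (x :: t).length = run.length + rest.length := by
          rw [← hsplit, List.length_append]
        have h1 := hG (run.length + i) (run.length + j) (run.length + k)
          (by omega) (by omega) (by omega)
        rw [← hsplit, pv_getD_append_right, pv_getD_append_right, pv_getD_append_right] at h1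
        exact h1 hik
      have hlensum : (x :: t).length = run.length + rest.length := by
        rw [← hsplit, List.length_append]
      have hlen' : rest.length ≤ fuel := by
        simp only [List.length_cons] at hlensum hbs
        omega
      have hofl : PySem.Set.ofList (x :: t) = x :: PySem.Set.ofList rest := by
        conv_lhs => rw [← hsplit, hrep]
        obtain ⟨n', hn'⟩ : ∃ n', run.length = n' + 1 := ⟨run.length - 1, by omega⟩
        rw [hn']
        exact pv_ofList_replicate_append n' x rest hxrest
      have hmapc : (PySem.Set.ofList rest).map
            (fun b => (List.replicate ((x :: t).count b) (F b)).flatten)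
          = (PySem.Set.ofList rest).map
            (fun b => (List.replicate (rest.count b) (F b)).flatten) := by
        apply List.map_congr_left
        intro b hb
        have hbrest : b ∈ rest := (PySem.Set.mem_ofList rest b).mp hb
        have hbx : b ≠ x := fun hbeq => hxrest (hbeq ▸ hbrest)
        rw [hcb b hbx]
      have hL : ((PySem.Set.ofList (x :: t)).map
            (fun b => (List.replicate ((x :: t).count b) (F b)).flatten)).flatten
          = (List.replicate run.length (F x)).flatten ++ (rest.map F).flatten := by
        rw [hofl]
        simp only [List.map_cons, List.flatten_cons, hcx]
        rw [hmapc, ih rest hlen' hGrest]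
      have hR : ((x :: t).map F).flatten
          = (List.replicate run.length (F x)).flatten ++ (rest.map F).flatten := by
        conv_lhs => rw [← hsplit]
        rw [List.map_append, List.flatten_append]
        congr 1
        congr 1
        conv_lhs => rw [hrep]
        rw [List.map_replicate]
      rw [hL, hR]

-- ===== characterizations of the two ports =====

-- the block list both characterizations speak about
def pvBS (plaintext : String) (key_1 : Int) (key_2 : String) : List (List Char) :=
  pvChunk (key_2.toList.countP (fun c => pvAlpha.contains c))
    ((plaintext.toList.filter (fun c => pvAlpha.contains c)).map (pvShift key_1))

theorem pv_A_form (plaintext : String) (key_1 : Int) (key_2 : String)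
    (hpre : Pre_encr plaintext key_1 key_2) :
    encr plaintext key_1 key_2 = String.ofList
      (((PySem.Set.ofList (pvBS plaintext key_1 key_2)).map
        (fun b => (List.replicate ((pvBS plaintext key_1 key_2).count b)
          (pvCipher key_2.toList b)).flatten)).flatten) := by
  obtain ⟨hm0, _hkey⟩ := hpre
  simp only [encr]
  simp only [pv_caesar_eq]
  simp only [pv_letters_eq]
  have hmAB : ((key_2.toList.filter (fun i => pvAlpha.contains i)).map PySem.Chars.lowerChar).length
      = key_2.toList.countP (fun c => pvAlpha.contains c) := by
    simp [List.countP_eq_length_filter]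
  simp only [hmAB]
  simp only [pv_shift_fun]
  set L0 : List Char := plaintext.toList.filter (fun c => pvAlpha.contains c) with hL0def
  set L : List Char := L0.map (pvShift key_1) with hLdef
  set m : Nat := key_2.toList.countP (fun c => pvAlpha.contains c) with hmdef
  simp only [pv_outer_fill L m hm0]
  set bs : List (List Char) := pvChunk m L with hbsdef
  have hK2len : m ≤ key_2.toList.length := by
    rw [hmdef]; exact List.countP_le_length
  have hble : ∀ blk ∈ bs, blk.length ≤ key_2.toList.length := by
    intro blk hblk
    exact le_trans (pv_chunk_block_le m hm0 L blk hblk) hK2len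
  have hClen : bs.length = (L.length + m - 1) / m := pv_chunk_length m hm0 L
  rw [pv_A_cipher bs key_2.toList hble]
  obtain ⟨hlenF, hinvF⟩ := pv_cipher_fold bs key_2.toList bs [] rfl
    (List.replicate ((L.length + m - 1) / m) []) (by simp [hClen]) (by
      intro k hk
      have hk' : k < (L.length + m - 1) / m := by omega
      rw [List.getD_eq_getElem _ [] (by simpa using hk'), List.getElem_replicate]
      simp)
  have hA : bs.foldl (pvStep bs key_2.toList) (List.replicate ((L.length + m - 1) / m) [])
      = (List.range bs.length).map (fun k =>
          if PySem.List.index? bs (bs.getD k []) == some k then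
            (List.replicate (bs.count (bs.getD k [])) (pvCipher key_2.toList (bs.getD k []))).flatten
          else []) := by
    apply pv_eq_map_range _ _ hlenF
    intro k hk
    rw [hinvF k hk]
    simp
  rw [hA, PySem.List.foldl_append_eq_flatten, List.nil_append, pv_flatten_ite]
  have hmapmap : ((List.range bs.length).filter (fun k =>
        PySem.List.index? bs (bs.getD k []) == some k)).map (fun k =>
          (List.replicate (bs.count (bs.getD k [])) (pvCipher key_2.toList (bs.getD k []))).flatten)
      = (((List.range bs.length).filter (fun k =>
        PySem.List.index? bs (bs.getD k []) == some k)).map (fun k => bs.getD k [])).map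
          (fun b => (List.replicate (bs.count b) (pvCipher key_2.toList b)).flatten) := by
    rw [List.map_map]
    rfl
  rw [hmapmap, pv_first_ofList]
  rfl

theorem pv_B_form (plaintext : String) (key_1 : Int) (key_2 : String)
    (hpre : Pre_encr plaintext key_1 key_2) :
    encr_alt plaintext key_1 key_2 = String.ofList
      (((pvBS plaintext key_1 key_2).map (pvCipher key_2.toList)).flatten) := by
  obtain ⟨hm0, hkey⟩ := hpre
  simp only [encr_alt]
  simp only [pv_shift_fun]
  have hmB : ((key_2.toList.filter (fun i => pvAlpha.contains i)).map
      (fun c => (((PySem.List.index? pvAlpha c).getD 0 : Nat) : Int))).length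
      = key_2.toList.countP (fun c => pvAlpha.contains c) := by
    simp [List.countP_eq_length_filter]
  simp only [hmB]
  set L0 : List Char := plaintext.toList.filter (fun c => pvAlpha.contains c) with hL0def
  set L : List Char := L0.map (pvShift key_1) with hLdef
  set m : Nat := key_2.toList.countP (fun c => pvAlpha.contains c) with hmdef
  have hLlen : L.length = plaintext.toList.countP (fun c => pvAlpha.contains c) := by
    rw [hLdef, List.length_map, hL0def, List.countP_eq_length_filter]
  have hK2len : m ≤ key_2.toList.length := by
    rw [hmdef]; exact List.countP_le_length
  have hble : ∀ blk ∈ pvChunk m L, blk.length ≤ key_2.toList.length := by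
    intro blk hblk
    exact le_trans (pv_chunk_block_le m hm0 L blk hblk) hK2len
  have hcip : (pvChunk m L).map (pvCipher key_2.toList)
      = (pvChunk m L).map (fun b => (List.range b.length).map
          (fun j => pvShift (pvIdx (key_2.toList.getD j ' ')) (b.getD j ' '))) := by
    apply List.map_congr_left
    intro b hb
    rw [pv_cipher_map b key_2.toList (hble b hb)]
  have hRB : ((pvBS plaintext key_1 key_2).map (pvCipher key_2.toList)).flatten
      = (List.range L.length).map
          (fun k => pvShift (pvIdx (key_2.toList.getD (k % m) ' ')) (L.getD k ' ')) := by
    show ((pvChunk m L).map (pvCipher key_2.toList)).flatten = _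
    rw [hcip]
    exact pv_chunk_zipmap m hm0 _ L
  rw [pv_enum_map, hRB]
  apply congrArg
  apply List.map_congr_left
  intro k hk
  have hkn : k < L.length := List.mem_range.mp hk
  have hkey' : ∀ j, j < min (plaintext.toList.countP (fun c => pvAlpha.contains c)) m →
      pvAlpha.contains (key_2.toList.getD j ' ') := by
    intro j hj
    rw [List.all_eq_true] at hkey
    exact hkey j (List.mem_range.mpr hj)
  have hmod : PySem.Int.mod ((k : Int)) ((m : Int)) = (((k % m : Nat)) : Int) := by
    rw [PySem.Int.mod_eq_emod_of_pos (by exact_mod_cast hm0 : (0:Int) < (m:Int))]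
    push_cast
    rfl
  have hjlt : k % m < min (plaintext.toList.countP (fun c => pvAlpha.contains c)) m := by
    have h1 : k % m < m := Nat.mod_lt _ hm0
    have h2 : k % m ≤ k := Nat.mod_le _ _
    omega
  have hkagree := pv_key_prefix key_2.toList
    (min (plaintext.toList.countP (fun c => pvAlpha.contains c)) m) hkey' (k % m) hjlt
  dsimp only
  rw [hmod, PySem.List.pyGetD_natCast, hkagree]

-- ===== the grouping property of the blocks, from ¬D_ / D_ =====

theorem pv_bs_getD (plaintext : String) (key_1 : Int) (key_2 : String)
    (hm0 : 0 < key_2.toList.countP (fun c => pvAlpha.contains c)) :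
    ∀ t, t < (pvBS plaintext key_1 key_2).length →
      (pvBS plaintext key_1 key_2).getD t []
        = ((pvChunk (key_2.toList.countP (fun c => pvAlpha.contains c))
            (plaintext.toList.filter (fun c => pvAlpha.contains c))).getD t []).map
              (pvShift key_1) := by
  intro t ht
  have hcomm : pvBS plaintext key_1 key_2
      = (pvChunk (key_2.toList.countP (fun c => pvAlpha.contains c))
          (plaintext.toList.filter (fun c => pvAlpha.contains c))).map
            (List.map (pvShift key_1)) := by
    rw [pvBS, pv_chunk_map_comm _ hm0]
  rw [hcomm] at ht ⊢
  rw [List.getD_eq_getElem _ [] ht, List.getElem_map,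
    ← List.getD_eq_getElem _ [] (by simpa using ht)]

theorem pv_bs0_chars (plaintext : String) (key_2 : String)
    (hm0 : 0 < key_2.toList.countP (fun c => pvAlpha.contains c)) :
    ∀ t, t < (pvChunk (key_2.toList.countP (fun c => pvAlpha.contains c))
        (plaintext.toList.filter (fun c => pvAlpha.contains c))).length →
      ∀ x ∈ (pvChunk (key_2.toList.countP (fun c => pvAlpha.contains c))
        (plaintext.toList.filter (fun c => pvAlpha.contains c))).getD t [], x ∈ pvAlpha := by
  intro t ht x hx
  have hblk : (pvChunk (key_2.toList.countP (fun c => pvAlpha.contains c))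
      (plaintext.toList.filter (fun c => pvAlpha.contains c))).getD t []
      ∈ pvChunk (key_2.toList.countP (fun c => pvAlpha.contains c))
        (plaintext.toList.filter (fun c => pvAlpha.contains c)) := by
    rw [List.getD_eq_getElem _ [] ht]; exact List.getElem_mem ht
  have hxL0 : x ∈ plaintext.toList.filter (fun c => pvAlpha.contains c) :=
    pv_chunk_mem_mem _ hm0 _ _ hblk x hx
  simpa using (List.mem_filter.mp hxL0).2

theorem pv_grouped_of_not_D (plaintext : String) (key_1 : Int) (key_2 : String)
    (hm0 : 0 < key_2.toList.countP (fun c => pvAlpha.contains c))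
    (hnd : ¬ D_encr plaintext key_1 key_2) : pvGrouped (pvBS plaintext key_1 key_2) := by
  set L0 : List Char := plaintext.toList.filter (fun c => pvAlpha.contains c) with hL0def
  set m : Nat := key_2.toList.countP (fun c => pvAlpha.contains c) with hmdef
  have hB : (pvChunk m L0).length = (L0.length + m - 1) / m := pv_chunk_length m hm0 L0
  have hBS : (pvBS plaintext key_1 key_2).length = (pvChunk m L0).length := by
    rw [pvBS, ← hL0def, ← hmdef, pv_chunk_map_comm _ hm0, List.length_map]
  have hgd0 : ∀ t, t < (pvChunk m L0).length →
      (pvChunk m L0).getD t [] = (L0.drop (t * m)).take m := by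
    intro t ht
    rw [pv_chunk_map m hm0] at ht ⊢
    rw [List.getD_eq_getElem _ [] ht]
    simp only [List.getElem_map, List.getElem_range]
  intro i j k hij hjk hk hik
  have hi : i < (pvChunk m L0).length := by omega
  have hj : j < (pvChunk m L0).length := by omega
  have hk0 : k < (pvChunk m L0).length := by omega
  have hgd := pv_bs_getD plaintext key_1 key_2 hm0
  rw [← hL0def, ← hmdef] at hgd
  rw [hgd i (by omega), hgd k (by omega)] at hik
  have h0ik : (pvChunk m L0).getD i [] = (pvChunk m L0).getD k [] :=
    pv_map_shift_inj key_1 _ _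
      (by have := pv_bs0_chars plaintext key_2 hm0; rw [← hL0def, ← hmdef] at this; exact this i hi)
      (by have := pv_bs0_chars plaintext key_2 hm0; rw [← hL0def, ← hmdef] at this; exact this k hk0)
      hik
  have h0ij : (pvChunk m L0).getD i [] = (pvChunk m L0).getD j [] := by
    by_contra hne
    apply hnd
    refine ⟨k, ?_, j, hjk, i, hij, ?_, ?_⟩
    · rw [← hL0def, ← hmdef]; omega
    · rw [← hL0def, ← hmdef, ← hgd0 i hi, ← hgd0 k hk0]
      exact h0ik
    · rw [← hL0def, ← hmdef, ← hgd0 i hi, ← hgd0 j hj]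
      exact hne
  rw [hgd i (by omega), hgd j (by omega), h0ij]

theorem pv_ungrouped_of_D (plaintext : String) (key_1 : Int) (key_2 : String)
    (hm0 : 0 < key_2.toList.countP (fun c => pvAlpha.contains c))
    (hD : D_encr plaintext key_1 key_2) : ¬ pvGrouped (pvBS plaintext key_1 key_2) := by
  intro hG
  set L0 : List Char := plaintext.toList.filter (fun c => pvAlpha.contains c) with hL0def
  set m : Nat := key_2.toList.countP (fun c => pvAlpha.contains c) with hmdef
  obtain ⟨k, hkB, j, hjk, i, hij, heq, hne⟩ := hD
  rw [← hL0def, ← hmdef] at hkB heq hne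
  have hB : (pvChunk m L0).length = (L0.length + m - 1) / m := pv_chunk_length m hm0 L0
  have hBS : (pvBS plaintext key_1 key_2).length = (pvChunk m L0).length := by
    rw [pvBS, ← hL0def, ← hmdef, pv_chunk_map_comm _ hm0, List.length_map]
  have hgd0 : ∀ t, t < (pvChunk m L0).length →
      (pvChunk m L0).getD t [] = (L0.drop (t * m)).take m := by
    intro t ht
    rw [pv_chunk_map m hm0] at ht ⊢
    rw [List.getD_eq_getElem _ [] ht]
    simp only [List.getElem_map, List.getElem_range]
  have hk0 : k < (pvChunk m L0).length := by omega
  have hi : i < (pvChunk m L0).length := by omega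
  have hj : j < (pvChunk m L0).length := by omega
  have hgd := pv_bs_getD plaintext key_1 key_2 hm0
  rw [← hL0def, ← hmdef] at hgd
  have hik' : (pvBS plaintext key_1 key_2).getD i [] = (pvBS plaintext key_1 key_2).getD k [] := by
    rw [hgd i (by omega), hgd k (by omega)]
    rw [← hgd0 i hi, ← hgd0 k hk0] at heq
    rw [heq]
  have hij' := hG i j k hij hjk (by omega) hik'
  rw [hgd i (by omega), hgd j (by omega)] at hij'
  have h0 : (pvChunk m L0).getD i [] = (pvChunk m L0).getD j [] :=
    pv_map_shift_inj key_1 _ _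
      (by have := pv_bs0_chars plaintext key_2 hm0; rw [← hL0def, ← hmdef] at this; exact this i hi)
      (by have := pv_bs0_chars plaintext key_2 hm0; rw [← hL0def, ← hmdef] at this; exact this j hj)
      hij'
  apply hne
  rw [← hgd0 i hi, ← hgd0 j hj]
  exact h0

-- ===== facts feeding the tightness proof =====

theorem pv_cipher_len (key b : List Char) (hb : b.length ≤ key.length) :
    (pvCipher key b).length = b.length := by
  simp only [pvCipher, List.length_map, List.length_zip]
  omega

theorem pv_cipher_inj :
    ∀ (b key b' : List Char), (∀ x ∈ b, x ∈ pvAlpha) → (∀ x ∈ b', x ∈ pvAlpha) →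
      b.length ≤ key.length → b'.length ≤ key.length →
      pvCipher key b = pvCipher key b' → b = b' := by
  intro b
  induction b with
  | nil =>
    intro key b' _ hb' _ hl' h
    have hlen := congrArg List.length h
    rw [pv_cipher_len key [] (by simp), pv_cipher_len key b' hl'] at hlen
    exact (List.eq_nil_of_length_eq_zero hlen.symm).symm
  | cons xc tc ih =>
    intro key b' hb hb' hl hl' h
    cases b' with
    | nil =>
      have hlen := congrArg List.length h
      rw [pv_cipher_len key (xc :: tc) hl, pv_cipher_len key [] (by simp)] at hlen
      simp at hlen
    | cons yc tc' =>
      cases key with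
      | nil => simp at hl
      | cons k0 ks =>
        simp only [pvCipher, List.zip_cons_cons, List.map_cons, List.cons.injEq] at h
        have hx := pv_shift_inj (pvIdx k0) (hb xc (by simp)) (hb' yc (by simp)) h.1
        have ht := ih ks tc' (fun z hz => hb z (by simp [hz]))
          (fun z hz => hb' z (by simp [hz]))
          (by simpa using hl) (by simpa using hl') h.2
        rw [hx, ht]

theorem pv_chunk_full (m : Nat) (hm : 0 < m) (l : List Char) :
    ∀ t, t + 1 < (pvChunk m l).length → ((pvChunk m l).getD t []).length = m := by
  intro t ht
  rw [pv_chunk_length m hm] at ht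
  rw [pv_chunk_map m hm, List.getD_eq_getElem _ []
    (by simp only [List.length_map, List.length_range]; omega)]
  simp only [List.getElem_map, List.getElem_range, List.length_take, List.length_drop]
  have hdiv : ((l.length + m - 1) / m) * m ≤ l.length + m - 1 := Nat.div_mul_le_self _ _
  have h2 : (t + 2) * m ≤ ((l.length + m - 1) / m) * m := Nat.mul_le_mul_right m (by omega)
  have h3 : (t + 2) * m = t * m + m + m := by ring
  omega

-- foldl Set.add keeps its head
theorem pv_foldl_add_head (l : List (List Char)) :
    ∀ (a : List Char) (s : List (List Char)),
      ∃ s', l.foldl PySem.Set.add (a :: s) = a :: s' := by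
  induction l with
  | nil => intro a s; exact ⟨s, rfl⟩
  | cons y l ih =>
    intro a s
    rw [List.foldl_cons]
    by_cases hy : y ∈ a :: s
    · rw [PySem.Set.add_of_mem hy]; exact ih a s
    · rw [PySem.Set.add_of_not_mem hy]
      have : (a :: s) ++ [y] = a :: (s ++ [y]) := rfl
      rw [this]
      exact ih a (s ++ [y])

theorem pv_getD_append_left {α : Type} (l l' : List α) (i : Nat) (d : α) (h : i < l.length) :
    (l ++ l').getD i d = l.getD i d := by
  rw [List.getD_eq_getElem _ d (by simp only [List.length_append]; omega),
    List.getElem_append_left h, ← List.getD_eq_getElem l d h]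

theorem pv_ofList_inj {a b : List Char} (h : String.ofList a = String.ofList b) : a = b := by
  have := congrArg String.toList h
  simpa using this

-- on an UNgrouped block list the two flattenings differ (the converse of pv_grouped_flatten),
-- provided all blocks but the last have the same length m and F is injective and length-preserving
theorem pv_ungrouped_flatten (F : List Char → List Char) (m : Nat) :
    ∀ (fuel : Nat) (bs : List (List Char)), bs.length ≤ fuel →
      (∀ t, t + 1 < bs.length → (bs.getD t []).length = m) →
      (∀ b ∈ bs, (F b).length = b.length) →
      (∀ b b', b ∈ bs → b' ∈ bs → F b = F b' → b = b') →
      ¬ pvGrouped bs →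
      ((PySem.Set.ofList bs).map
          (fun b => (List.replicate (bs.count b) (F b)).flatten)).flatten
        ≠ (bs.map F).flatten := by
  intro fuel
  induction fuel with
  | zero =>
    intro bs hbs _ _ _ hnG
    exfalso
    apply hnG
    have : bs = [] := List.eq_nil_of_length_eq_zero (Nat.le_zero.mp hbs)
    subst this
    intro i j k _ _ hk _
    simp at hk
  | succ fuel ih =>
    intro bs hbs hL hFlen hFinj hnG
    cases hbse : bs with
    | nil =>
      subst hbse
      exfalso
      apply hnG
      intro i j k _ _ hk _
      simp at hk
    | cons x t =>
      subst hbse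
      set p : List Char → Bool := fun y => y == x with hp
      set run := (x :: t).takeWhile p with hrun
      set rest := (x :: t).dropWhile p with hrest
      have hsplit : run ++ rest = x :: t := List.takeWhile_append_dropWhile
      have hrunx : ∀ y ∈ run, y = x := by
        intro y hy
        have := List.mem_takeWhile_imp hy
        simpa [hp] using this
      have hrun1 : run = x :: t.takeWhile p := by
        rw [hrun, List.takeWhile_cons_of_pos (by simp [hp])]
      have hn1 : 0 < run.length := by rw [hrun1]; simp
      have hrep : run = List.replicate run.length x :=
        List.eq_replicate_iff.mpr ⟨rfl, hrunx⟩
      have hrest0 : ∀ (y : List Char) (r' : List (List Char)), rest = y :: r' → y ≠ x := by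
        intro y r' hcase
        have hdw : (x :: t).dropWhile p = y :: r' := by rw [← hrest]; exact hcase
        have hne : (x :: t).dropWhile p ≠ [] := by rw [hdw]; simp
        have hhd := List.head_dropWhile_not p hne
        have hhy : ((x :: t).dropWhile p).head hne = y := by simp [hdw]
        rw [hhy] at hhd
        intro hyx
        rw [hyx] at hhd
        simp [hp] at hhd
      have hlensum : (x :: t).length = run.length + rest.length := by
        rw [← hsplit, List.length_append]
      by_cases hxr : x ∈ rest
      · -- x recurs after the run: the grouped string pulls a copy of F x forward
        rcases hcase : rest with _ | ⟨y, r'⟩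
        · rw [hcase] at hxr; simp at hxr
        · have hy : y ≠ x := hrest0 y r' hcase
          have hxr' : x ∈ r' := by
            rw [hcase] at hxr
            rcases List.mem_cons.mp hxr with h | h
            · exact absurd h.symm hy
            · exact h
          have hrlen2 : 2 ≤ rest.length := by
            rw [hcase]
            have := List.length_pos_iff.mpr (List.ne_nil_of_mem hxr')
            simp only [List.length_cons]
            omega
          have hxlen : x.length = m := by
            have h0 := hL 0 (by simp only [List.length_cons] at hlensum ⊢; omega)
            simpa using h0
          have hgj : (x :: t).getD run.length [] = y := by
            have h5 := pv_getD_append_right run rest 0 ([] : List Char)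
            rw [hsplit] at h5
            simpa [hcase] using h5
          have hylen : y.length = m := by
            have h0 := hL run.length (by simp only [List.length_cons] at hlensum ⊢; omega)
            rw [hgj] at h0
            exact h0
          have hymem : y ∈ x :: t := by
            rw [← hsplit, hcase]
            exact List.mem_append.mpr (Or.inr (by simp))
          have hcnt : (x :: t).count x = run.length + rest.count x := by
            rw [← hsplit, List.count_append]
            congr 1
            rw [hrep, List.count_replicate]
            simp
          have hcpos : 0 < rest.count x := List.count_pos_iff.mpr hxr
          obtain ⟨d, hd⟩ : ∃ d, rest.count x = d + 1 := ⟨rest.count x - 1, by omega⟩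
          obtain ⟨s', hs'⟩ := pv_foldl_add_head t x []
          have hofl' : PySem.Set.ofList (x :: t) = x :: s' := by
            show (x :: t).foldl PySem.Set.add [] = x :: s'
            rw [List.foldl_cons, PySem.Set.add_of_not_mem (by simp)]
            exact hs'
          intro heq
          have hA : ((PySem.Set.ofList (x :: t)).map
                (fun b => (List.replicate ((x :: t).count b) (F b)).flatten)).flatten
              = (List.replicate run.length (F x)).flatten ++
                  (F x ++ ((List.replicate d (F x)).flatten ++
                    (s'.map (fun b => (List.replicate ((x :: t).count b) (F b)).flatten)).flatten)) := by
            rw [hofl']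
            simp only [List.map_cons, List.flatten_cons]
            rw [hcnt, hd, List.replicate_add, List.flatten_append, List.replicate_succ,
              List.flatten_cons]
            simp [List.append_assoc]
          have hB : ((x :: t).map F).flatten
              = (List.replicate run.length (F x)).flatten ++ (F y ++ (r'.map F).flatten) := by
            conv_lhs => rw [← hsplit, hcase]
            rw [List.map_append, List.flatten_append, List.map_cons, List.flatten_cons]
            congr 1
            conv_lhs => rw [hrep]
            rw [List.map_replicate]
          rw [hA, hB] at heq
          have h1 := List.append_cancel_left heq
          have h2 := List.append_inj h1 (by
            rw [hFlen x (by simp), hFlen y hymem, hxlen, hylen])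
          exact hy (hFinj x y (by simp) hymem h2.1).symm
      · -- x does not recur: both strings start with the same run; recurse on the rest
        have hcx : (x :: t).count x = run.length := by
          rw [← hsplit, List.count_append]
          have h1 : run.count x = run.length := by
            rw [hrep, List.count_replicate]; simp
          have h2 : rest.count x = 0 := List.count_eq_zero.mpr hxr
          omega
        have hcb : ∀ b, b ≠ x → (x :: t).count b = rest.count b := by
          intro b hb
          rw [← hsplit, List.count_append]
          have h1 : run.count b = 0 := by
            rw [hrep, List.count_replicate, if_neg (by simpa using Ne.symm hb)]
          omega
        have hlen' : rest.length ≤ fuel := by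
          simp only [List.length_cons] at hlensum hbs
          omega
        have hLrest : ∀ t', t' + 1 < rest.length → (rest.getD t' []).length = m := by
          intro t' ht'
          have h0 := hL (run.length + t') (by simp only [List.length_cons] at hlensum ⊢; omega)
          rw [← hsplit, pv_getD_append_right] at h0
          exact h0
        have hFlenrest : ∀ b ∈ rest, (F b).length = b.length := by
          intro b hb
          exact hFlen b (by rw [← hsplit]; exact List.mem_append.mpr (Or.inr hb))
        have hFinjrest : ∀ b b', b ∈ rest → b' ∈ rest → F b = F b' → b = b' := by
          intro b b' hb hb' h
          exact hFinj b b' (by rw [← hsplit]; exact List.mem_append.mpr (Or.inr hb))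
            (by rw [← hsplit]; exact List.mem_append.mpr (Or.inr hb')) h
        have hnGrest : ¬ pvGrouped rest := by
          intro hGrest
          apply hnG
          intro i j k hij hjk hk hik
          have hsh : ∀ i', (x :: t).getD (run.length + i') [] = rest.getD i' [] := by
            intro i'
            rw [← hsplit]
            exact pv_getD_append_right run rest i' []
          by_cases hkrun : k < run.length
          · have hbsj : (x :: t).getD j [] = x := by
              rw [← hsplit, pv_getD_append_left _ _ _ _ (by omega)]
              rw [List.getD_eq_getElem run [] (by omega)]
              exact hrunx _ (List.getElem_mem (by omega))
            have hbsi : (x :: t).getD i [] = x := by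
              rw [← hsplit, pv_getD_append_left _ _ _ _ (by omega)]
              rw [List.getD_eq_getElem run [] (by omega)]
              exact hrunx _ (List.getElem_mem (by omega))
            rw [hbsi, hbsj]
          · by_cases hirun : i < run.length
            · -- bs i = x would recur at k ≥ run.length, i.e. inside rest: impossible
              exfalso
              have hbsi : (x :: t).getD i [] = x := by
                rw [← hsplit, pv_getD_append_left _ _ _ _ (by omega)]
                rw [List.getD_eq_getElem run [] (by omega)]
                exact hrunx _ (List.getElem_mem (by omega))
              have hkrest : (x :: t).getD k [] ∈ rest := by
                rw [show k = run.length + (k - run.length) from by omega, hsh]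
                rw [List.getD_eq_getElem rest [] (by omega)]
                exact List.getElem_mem _
              rw [← hik, hbsi] at hkrest
              exact hxr hkrest
            · -- the whole triple lies inside rest
              rw [show i = run.length + (i - run.length) from by omega, hsh] at hik
              rw [show k = run.length + (k - run.length) from by omega, hsh] at hik
              have hres := hGrest (i - run.length) (j - run.length) (k - run.length)
                (by omega) (by omega) (by omega) hik
              rw [show i = run.length + (i - run.length) from by omega, hsh,
                show j = run.length + (j - run.length) from by omega, hsh]
              exact hres
        -- x ∉ rest: first-occurrence grouping keeps the run in place
        have hofl : PySem.Set.ofList (x :: t) = x :: PySem.Set.ofList rest := by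
          conv_lhs => rw [← hsplit, hrep]
          obtain ⟨n', hn'⟩ : ∃ n', run.length = n' + 1 := ⟨run.length - 1, by omega⟩
          rw [hn']
          exact pv_ofList_replicate_append n' x rest hxr
        have hmapc : (PySem.Set.ofList rest).map
              (fun b => (List.replicate ((x :: t).count b) (F b)).flatten)
            = (PySem.Set.ofList rest).map
              (fun b => (List.replicate (rest.count b) (F b)).flatten) := by
          apply List.map_congr_left
          intro b hb
          have hbrest : b ∈ rest := (PySem.Set.mem_ofList rest b).mp hb
          have hbx : b ≠ x := fun hbeq => hxr (hbeq ▸ hbrest)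
          rw [hcb b hbx]
        intro heq
        have hA : ((PySem.Set.ofList (x :: t)).map
              (fun b => (List.replicate ((x :: t).count b) (F b)).flatten)).flatten
            = (List.replicate run.length (F x)).flatten ++
                ((PySem.Set.ofList rest).map
                  (fun b => (List.replicate (rest.count b) (F b)).flatten)).flatten := by
          rw [hofl]
          simp only [List.map_cons, List.flatten_cons, hcx]
          rw [hmapc]
        have hB : ((x :: t).map F).flatten
            = (List.replicate run.length (F x)).flatten ++ (rest.map F).flatten := by
          conv_lhs => rw [← hsplit]
          rw [List.map_append, List.flatten_append]
          congr 1
          conv_lhs => rw [hrep]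
          rw [List.map_replicate]
        rw [hA, hB] at heq
        exact ih rest hlen' hLrest hFlenrest hFinjrest hnGrest
          (List.append_cancel_left heq)

-- ===== VERDICT (by name: the statements are the Claim_ definitions above) =====

theorem encr_spec : Claim_unchanged_encr := by
  intro plaintext key_1 key_2 _hdom hpre hnd
  show encr plaintext key_1 key_2 = encr_alt plaintext key_1 key_2
  rw [pv_A_form plaintext key_1 key_2 hpre, pv_B_form plaintext key_1 key_2 hpre]
  apply congrArg
  exact pv_grouped_flatten (pvCipher key_2.toList) (pvBS plaintext key_1 key_2).length
    (pvBS plaintext key_1 key_2) le_rfl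
    (pv_grouped_of_not_D plaintext key_1 key_2 hpre.1 hnd)

theorem encr_changed : Claim_changed_encr := by
  unfold Claim_changed_encr
  decide

theorem encr_tight : Claim_exact_encr := by
  intro plaintext key_1 key_2 _hdom hpre hD h
  have hm0 : 0 < key_2.toList.countP (fun c => pvAlpha.contains c) := hpre.1
  rw [pv_A_form plaintext key_1 key_2 hpre, pv_B_form plaintext key_1 key_2 hpre] at h
  have hlists := pv_ofList_inj h
  have hK2len : key_2.toList.countP (fun c => pvAlpha.contains c) ≤ key_2.toList.length :=
    List.countP_le_length
  have hble : ∀ b ∈ pvBS plaintext key_1 key_2, b.length ≤ key_2.toList.length := by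
    intro b hb
    exact le_trans (pv_chunk_block_le _ hm0 _ b hb) hK2len
  have hchars : ∀ b ∈ pvBS plaintext key_1 key_2, ∀ x ∈ b, x ∈ pvAlpha := by
    intro b hb x hx
    have hxL := pv_chunk_mem_mem _ hm0 _ b hb x hx
    obtain ⟨c, _, rfl⟩ := List.mem_map.mp hxL
    exact pv_shift_mem _ _
  exact pv_ungrouped_flatten (pvCipher key_2.toList)
    (key_2.toList.countP (fun c => pvAlpha.contains c))
    (pvBS plaintext key_1 key_2).length (pvBS plaintext key_1 key_2) le_rfl
    (pv_chunk_full _ hm0 _)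
    (fun b hb => pv_cipher_len key_2.toList b (hble b hb))
    (fun b b' hb hb' => pv_cipher_inj b key_2.toList b' (hchars b hb) (hchars b' hb')
      (hble b hb) (hble b' hb'))
    (pv_ungrouped_of_D plaintext key_1 key_2 hm0 hD)
    hlists
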